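-- pv_equiv track=rewrite | github.com/OmarTahoun/competitive-programming | Code Forces/PY/min_time.py | solution
-- ===== SOURCE A (Python) =====
-- def solution(A):
--   """Your solution goes here."""
--   A.sort(reverse= True)
--   a, b = 0,0
--   for x in A:
--     if a<=b:
--       a+=x
--     else:
--       b+=x
--   return abs(a-b)
-- ===== SOURCE B (Python) =====
-- def solution(A):
--   """Your solution goes here."""
--   A.sort(reverse=True)
--   d = 0
--   for x in A:
--     d = abs(d - x)
--   return d
-- ===== Notes on version B (the rewrite author's own statement) =====
-- stated objective: simpler
-- what changed: Replaces the two pile sums a,b and the a<=b branch with a single nonnegative running gap d updated as d = abs(d - x), since adding x to the smaller pile turns the gap g into |g - x|.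
import Mathlib
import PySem

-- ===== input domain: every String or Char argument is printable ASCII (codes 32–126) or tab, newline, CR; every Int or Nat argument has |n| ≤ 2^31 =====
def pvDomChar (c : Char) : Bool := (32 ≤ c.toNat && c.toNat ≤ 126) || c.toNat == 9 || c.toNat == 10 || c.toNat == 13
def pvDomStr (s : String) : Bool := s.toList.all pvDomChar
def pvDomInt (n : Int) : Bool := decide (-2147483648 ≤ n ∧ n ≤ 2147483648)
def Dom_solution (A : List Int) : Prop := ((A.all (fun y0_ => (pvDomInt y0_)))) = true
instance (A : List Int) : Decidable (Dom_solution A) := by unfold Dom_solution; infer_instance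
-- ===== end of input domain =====

-- B keeps one running gap instead of A's two pile sums; A mutates its argument in place
-- (A.sort), B performs the same mutation in Python; the equivalence proved here is about
-- the return value.

-- ===== PORT A =====
def solution (A : List Int) : Int :=
  let S := PySem.List.sorted A (fun x => x) true
  let ab := S.foldl (fun (ab : Int × Int) x =>
    if ab.1 ≤ ab.2 then (ab.1 + x, ab.2) else (ab.1, ab.2 + x)) (0, 0)
  |ab.1 - ab.2|

-- ===== PORT B =====
def solution_alt (A : List Int) : Int :=
  let S := PySem.List.sorted A (fun x => x) true
  S.foldl (fun d x => |d - x|) 0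

-- ===== PRECONDITION & SPEC =====
def Spec_solution (A : List Int) (out : Int) : Prop := out = solution_alt A
instance (A : List Int) (out : Int) : Decidable (Spec_solution A out) := by unfold Spec_solution; infer_instance

-- ===== CLAIM (what is proved, stated in full; the proofs are below) =====
def Claim_equal_solution : Prop := ∀ (A : List Int), Dom_solution A → Spec_solution A (solution A)

-- ===== LEMMAS AND PROOFS =====

-- Invariant: the absolute difference of the two pile sums evolves as d ↦ |d - x|.
theorem pile_gap (l : List Int) : ∀ (a b : Int),
    (let ab := l.foldl (fun (ab : Int × Int) x =>
      if ab.1 ≤ ab.2 then (ab.1 + x, ab.2) else (ab.1, ab.2 + x)) (a, b)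
     |ab.1 - ab.2|) = l.foldl (fun d x => |d - x|) |a - b| := by
  induction l with
  | nil => intro a b; simp
  | cons x t ih =>
    intro a b
    simp only [List.foldl_cons]
    by_cases h : a ≤ b
    · rw [if_pos h, ih]
      have key : |a - b| - x = -((a + x) - b) := by
        rw [abs_of_nonpos (by omega : a - b ≤ 0)]; ring
      rw [key, abs_neg]
    · rw [if_neg h, ih]
      have key : |a - b| - x = a - (b + x) := by
        rw [abs_of_nonneg (by omega : (0:Int) ≤ a - b)]; ring
      rw [key]

-- ===== VERDICT (by name: the statement is the Claim_ definition above) =====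
theorem solution_spec : Claim_equal_solution := by
  intro A _
  unfold Spec_solution solution solution_alt
  simpa using pile_gap (PySem.List.sorted A (fun x => x) true) 0 0
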